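-- pv_equiv track=rewrite | github.com/mascuud0715-arch/Main-bot-downloader. | user_bots_manager.py | is_valid_platform
-- ===== SOURCE A (Python) =====
-- def is_valid_platform(url, platform):
--     if not url:
--         return False
--
--     url = url.lower().strip()
--     platform = platform.lower().strip()
--
--     if platform == "tiktok":
--         return any(x in url for x in [
--             "tiktok.com",
--             "vt.tiktok.com",
--             "vm.tiktok.com"
--         ])
--
--     elif platform == "instagram":
--         return "instagram.com" in url
--
--     elif platform == "facebook":
--         return any(x in url for x in ["facebook.com", "fb.watch"])
--
--     elif platform == "youtube":
--         return any(x in url for x in ["youtube.com", "youtu.be"])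
--
--     elif platform == "twitter":
--         return any(x in url for x in ["twitter.com", "x.com"])
--
--     return False
-- ===== SOURCE B (Python) =====
-- PATTERN_PAIRS = [
--     ("tiktok.com", "tiktok"),
--     ("vt.tiktok.com", "tiktok"),
--     ("vm.tiktok.com", "tiktok"),
--     ("instagram.com", "instagram"),
--     ("facebook.com", "facebook"),
--     ("fb.watch", "facebook"),
--     ("youtube.com", "youtube"),
--     ("youtu.be", "youtube"),
--     ("twitter.com", "twitter"),
--     ("x.com", "twitter"),
-- ]
--
-- def is_valid_platform(url, platform):
--     if not url:
--         return False
--     url = url.lower().strip()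
--     platform = platform.lower().strip()
--     # One uniform scan over ALL (pattern, owner) pairs: compute the set of
--     # platforms that match the URL, then answer by membership.
--     matched = {name for pat, name in PATTERN_PAIRS if pat in url}
--     return platform in matched
-- ===== Notes on version B (the rewrite author's own statement) =====
-- stated objective: alternative
-- what changed: Instead of dispatching on the platform name and then scanning that platform's patterns, B inverts the computation: it scans one flat list of (pattern, owner) pairs against the URL to build the full set of platforms the URL matches, then answers by a single set-membership test of the requested platform.
import Mathlib
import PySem

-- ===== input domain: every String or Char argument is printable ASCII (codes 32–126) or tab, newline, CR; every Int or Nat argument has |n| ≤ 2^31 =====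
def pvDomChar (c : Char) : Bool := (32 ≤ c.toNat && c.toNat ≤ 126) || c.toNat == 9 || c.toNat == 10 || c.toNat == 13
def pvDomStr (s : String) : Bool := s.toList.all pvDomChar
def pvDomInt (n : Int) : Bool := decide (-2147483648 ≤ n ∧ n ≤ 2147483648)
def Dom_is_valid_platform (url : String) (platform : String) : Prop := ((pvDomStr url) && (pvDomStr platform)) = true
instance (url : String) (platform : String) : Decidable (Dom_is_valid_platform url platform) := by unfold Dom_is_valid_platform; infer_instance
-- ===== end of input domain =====

-- B inverts A's computation: one flat scan of all (pattern, owner) pairs builds the set of platforms the URL matches, then answers by set membership (alternative; same cost).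

-- ===== PORT A =====
def is_valid_platform (url : String) (platform : String) : Bool :=
  if url == "" then false
  else
    let url := PySem.Str.strip (PySem.Str.lower url)
    let platform := PySem.Str.strip (PySem.Str.lower platform)
    if platform == "tiktok" then
      ["tiktok.com", "vt.tiktok.com", "vm.tiktok.com"].any (fun x => PySem.Str.isIn x url)
    else if platform == "instagram" then
      PySem.Str.isIn "instagram.com" url
    else if platform == "facebook" then
      ["facebook.com", "fb.watch"].any (fun x => PySem.Str.isIn x url)
    else if platform == "youtube" then
      ["youtube.com", "youtu.be"].any (fun x => PySem.Str.isIn x url)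
    else if platform == "twitter" then
      ["twitter.com", "x.com"].any (fun x => PySem.Str.isIn x url)
    else false

-- ===== PORT B =====
def PATTERN_PAIRS : List (String × String) := [
  ("tiktok.com", "tiktok"),
  ("vt.tiktok.com", "tiktok"),
  ("vm.tiktok.com", "tiktok"),
  ("instagram.com", "instagram"),
  ("facebook.com", "facebook"),
  ("fb.watch", "facebook"),
  ("youtube.com", "youtube"),
  ("youtu.be", "youtube"),
  ("twitter.com", "twitter"),
  ("x.com", "twitter")]

def is_valid_platform_alt (url : String) (platform : String) : Bool :=
  if url == "" then false
  else
    let url := PySem.Str.strip (PySem.Str.lower url)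
    let platform := PySem.Str.strip (PySem.Str.lower platform)
    -- {name for pat, name in PATTERN_PAIRS if pat in url}
    let matched : PySem.Set String :=
      PySem.Set.ofList ((PATTERN_PAIRS.filter (fun pr => PySem.Str.isIn pr.1 url)).map Prod.snd)
    PySem.Set.contains matched platform

-- ===== PRECONDITION & SPEC =====
def Spec_is_valid_platform (url : String) (platform : String) (out : Bool) : Prop := out = is_valid_platform_alt url platform
instance (url : String) (platform : String) (out : Bool) : Decidable (Spec_is_valid_platform url platform out) := by unfold Spec_is_valid_platform; infer_instance

-- ===== CLAIM (what is proved, stated in full; the proofs are below) =====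
def Claim_equal_is_valid_platform : Prop := ∀ (url : String) (platform : String), Dom_is_valid_platform url platform → Spec_is_valid_platform url platform (is_valid_platform url platform)

-- ===== LEMMAS AND PROOFS =====

theorem contains_ofList {α : Type} [BEq α] [LawfulBEq α] (l : List α) (x : α) :
    PySem.Set.contains (PySem.Set.ofList l) x = l.contains x := by
  simp [PySem.Set.contains, PySem.Set.mem_ofList]

theorem contains_ite_cons (b : Bool) (x : String) (M : List String) (p : String) :
    (if b then x :: M else M).contains p = ((b && (p == x)) || M.contains p) := by
  cases b <;> simp [beq_eq_decide]

theorem matched_contains (u p : String) :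
    ((PATTERN_PAIRS.filter (fun pr => PySem.Str.isIn pr.1 u)).map Prod.snd).contains p =
      ((PySem.Str.isIn "tiktok.com" u && (p == "tiktok")) ||
       (PySem.Str.isIn "vt.tiktok.com" u && (p == "tiktok")) ||
       (PySem.Str.isIn "vm.tiktok.com" u && (p == "tiktok")) ||
       (PySem.Str.isIn "instagram.com" u && (p == "instagram")) ||
       (PySem.Str.isIn "facebook.com" u && (p == "facebook")) ||
       (PySem.Str.isIn "fb.watch" u && (p == "facebook")) ||
       (PySem.Str.isIn "youtube.com" u && (p == "youtube")) ||
       (PySem.Str.isIn "youtu.be" u && (p == "youtube")) ||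
       (PySem.Str.isIn "twitter.com" u && (p == "twitter")) ||
       (PySem.Str.isIn "x.com" u && (p == "twitter"))) := by
  simp only [PATTERN_PAIRS, List.filter_cons, List.filter_nil,
    apply_ite (List.map Prod.snd), List.map_cons, List.map_nil, contains_ite_cons]
  simp [Bool.or_assoc]

theorem chain_eq_disj (p : String) (t1 t2 t3 i1 f1 f2 y1 y2 w1 w2 : Bool) :
    (if p == "tiktok" then (t1 || (t2 || t3))
     else if p == "instagram" then i1
     else if p == "facebook" then (f1 || f2)
     else if p == "youtube" then (y1 || y2)
     else if p == "twitter" then (w1 || w2)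
     else false) =
      ((t1 && (p == "tiktok")) || (t2 && (p == "tiktok")) || (t3 && (p == "tiktok")) ||
       (i1 && (p == "instagram")) || (f1 && (p == "facebook")) || (f2 && (p == "facebook")) ||
       (y1 && (p == "youtube")) || (y2 && (p == "youtube")) ||
       (w1 && (p == "twitter")) || (w2 && (p == "twitter"))) := by
  by_cases h1 : p = "tiktok"
  · subst h1; simp [Bool.or_assoc]
  by_cases h2 : p = "instagram"
  · subst h2; simp
  by_cases h3 : p = "facebook"
  · subst h3; simp
  by_cases h4 : p = "youtube"
  · subst h4; simp
  by_cases h5 : p = "twitter"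
  · subst h5; simp
  have e1 : (p == "tiktok") = false := by simp [h1]
  have e2 : (p == "instagram") = false := by simp [h2]
  have e3 : (p == "facebook") = false := by simp [h3]
  have e4 : (p == "youtube") = false := by simp [h4]
  have e5 : (p == "twitter") = false := by simp [h5]
  simp [e1, e2, e3, e4, e5]

-- ===== VERDICT (by name: the statement is the Claim_ definition above) =====
theorem is_valid_platform_spec : Claim_equal_is_valid_platform := by
  intro url platform _
  show is_valid_platform url platform = is_valid_platform_alt url platform
  unfold is_valid_platform is_valid_platform_alt
  by_cases h : url == ""
  · simp [h]
  · simp only [h, Bool.false_eq_true, if_false, List.any_cons, List.any_nil, Bool.or_false]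
    rw [contains_ofList, matched_contains, chain_eq_disj]
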